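-- pv_equiv track=rewrite | github.com/DocD42/midi-voicing-lab | music_generator/voicings.py | fit_note_to_range
-- ===== SOURCE A (Python) =====
-- def fit_note_to_range(note: int, low: int, high: int, pc: int) -> int:
--     candidate = note
--     while candidate < low:
--         candidate += 12
--     while candidate > high:
--         candidate -= 12
--
--     shift_up = (pc - candidate) % 12
--     shift_down = shift_up - 12
--
--     up_note = candidate + shift_up
--     down_note = candidate + shift_down
--
--     options = [n for n in (up_note, down_note) if low <= n <= high]
--     if not options:
--         return max(low, min(high, candidate))
--     return min(options, key=lambda n: abs(n - note))
-- ===== SOURCE B (Python) =====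
-- def fit_note_to_range(note: int, low: int, high: int, pc: int) -> int:
--     # closed-form octave shifts instead of the two while loops
--     candidate = note + 12 * max(0, -((note - low) // 12))
--     candidate -= 12 * max(0, -((high - candidate) // 12))
--     up = candidate + (pc - candidate) % 12
--     down = up - 12
--     up_ok = low <= up <= high
--     down_ok = low <= down <= high
--     if up_ok and down_ok:
--         return up if abs(up - note) <= abs(down - note) else down
--     if up_ok:
--         return up
--     if down_ok:
--         return down
--     return max(low, min(high, candidate))
-- ===== Notes on version B (the rewrite author's own statement) =====
-- stated objective: simpler
-- what changed: The two octave-stepping while loops are replaced by closed-form ceiling-division arithmetic, and the filtered-list-plus-min(key=...) selection by an explicit branch chain.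
import Mathlib
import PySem

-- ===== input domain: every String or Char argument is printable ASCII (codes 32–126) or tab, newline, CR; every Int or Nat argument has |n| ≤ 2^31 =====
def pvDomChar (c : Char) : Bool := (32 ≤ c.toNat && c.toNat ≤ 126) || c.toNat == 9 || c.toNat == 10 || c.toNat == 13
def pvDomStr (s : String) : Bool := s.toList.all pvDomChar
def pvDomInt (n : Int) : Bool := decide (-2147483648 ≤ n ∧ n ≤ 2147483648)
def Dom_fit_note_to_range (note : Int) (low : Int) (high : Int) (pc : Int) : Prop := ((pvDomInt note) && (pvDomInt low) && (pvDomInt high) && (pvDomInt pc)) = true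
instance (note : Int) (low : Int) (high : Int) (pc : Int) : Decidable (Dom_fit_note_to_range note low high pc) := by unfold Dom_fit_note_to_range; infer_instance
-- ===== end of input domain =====

-- B replaces A's two octave-stepping while loops by closed-form ceiling-division
-- arithmetic and the filtered-list/min selection by an explicit branch chain (objective: simpler).

-- ===== PORT A =====
-- `while candidate < low: candidate += 12`
def pvLiftA (low : Int) (candidate : Int) : Int :=
  if candidate < low then pvLiftA low (candidate + 12) else candidate
  termination_by (low - candidate).toNat
  decreasing_by omega

-- `while candidate > high: candidate -= 12`
def pvDropA (high : Int) (candidate : Int) : Int :=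
  if candidate > high then pvDropA high (candidate - 12) else candidate
  termination_by (candidate - high).toNat
  decreasing_by omega

def fit_note_to_range (note : Int) (low : Int) (high : Int) (pc : Int) : Int :=
  let candidate := pvDropA high (pvLiftA low note)
  let shift_up := PySem.Int.mod (pc - candidate) 12
  let shift_down := shift_up - 12
  let up_note := candidate + shift_up
  let down_note := candidate + shift_down
  let options := [up_note, down_note].filter (fun n => low ≤ n && n ≤ high)
  if options = [] then max low (min high candidate)
  else (PySem.List.min? options (fun n => |n - note|)).getD 0  -- options ≠ [] in this branch

-- ===== PORT B =====
def fit_note_to_range_alt (note : Int) (low : Int) (high : Int) (pc : Int) : Int :=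
  let c1 := note + 12 * max 0 (-(PySem.Int.floordiv (note - low) 12))
  let candidate := c1 - 12 * max 0 (-(PySem.Int.floordiv (high - c1) 12))
  let up := candidate + PySem.Int.mod (pc - candidate) 12
  let down := up - 12
  if (low ≤ up ∧ up ≤ high) ∧ (low ≤ down ∧ down ≤ high) then
    if |up - note| ≤ |down - note| then up else down
  else if low ≤ up ∧ up ≤ high then up
  else if low ≤ down ∧ down ≤ high then down
  else max low (min high candidate)

-- ===== PRECONDITION & SPEC =====
def Spec_fit_note_to_range (note : Int) (low : Int) (high : Int) (pc : Int) (out : Int) : Prop := out = fit_note_to_range_alt note low high pc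
instance (note : Int) (low : Int) (high : Int) (pc : Int) (out : Int) : Decidable (Spec_fit_note_to_range note low high pc out) := by unfold Spec_fit_note_to_range; infer_instance

-- ===== CLAIM (what is proved, stated in full; the proofs are below) =====
def Claim_equal_fit_note_to_range : Prop := ∀ (note : Int) (low : Int) (high : Int) (pc : Int), Dom_fit_note_to_range note low high pc → Spec_fit_note_to_range note low high pc (fit_note_to_range note low high pc)

-- ===== LEMMAS AND PROOFS =====
theorem pvLiftA_closed (low c : Int) :
    pvLiftA low c = c + 12 * max 0 (-(PySem.Int.floordiv (c - low) 12)) := by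
  rw [PySem.Int.floordiv_eq_ediv_of_pos (by norm_num)]
  fun_induction pvLiftA low c with
  | case1 c h ih =>
      have h12 : (c - low) + 1 * 12 = c + 12 - low := by ring
      have hq : (c + 12 - low) / 12 = (c - low) / 12 + 1 := by
        rw [← h12, Int.add_mul_ediv_right _ _ (by norm_num)]
      rw [ih, hq]
      have h3 := Int.mul_ediv_add_emod (c - low) 12
      have h4 := Int.emod_nonneg (c - low) (by norm_num : (12:Int) ≠ 0)
      have h5 := Int.emod_lt_of_pos (c - low) (by norm_num : (0:Int) < 12)
      omega
  | case2 c h =>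
      have : 0 ≤ (c - low) / 12 := Int.ediv_nonneg (by omega) (by norm_num)
      omega

theorem pvDropA_closed (high c : Int) :
    pvDropA high c = c - 12 * max 0 (-(PySem.Int.floordiv (high - c) 12)) := by
  rw [PySem.Int.floordiv_eq_ediv_of_pos (by norm_num)]
  fun_induction pvDropA high c with
  | case1 c h ih =>
      have h12 : (high - c) + 1 * 12 = high - (c - 12) := by ring
      have hq : (high - (c - 12)) / 12 = (high - c) / 12 + 1 := by
        rw [← h12, Int.add_mul_ediv_right _ _ (by norm_num)]
      rw [ih, hq]
      have h3 := Int.mul_ediv_add_emod (high - c) 12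
      have h4 := Int.emod_nonneg (high - c) (by norm_num : (12:Int) ≠ 0)
      have h5 := Int.emod_lt_of_pos (high - c) (by norm_num : (0:Int) < 12)
      omega
  | case2 c h =>
      have : 0 ≤ (high - c) / 12 := Int.ediv_nonneg (by omega) (by norm_num)
      omega

theorem select_eq (note low high pc C : Int) :
    (if ([C + PySem.Int.mod (pc - C) 12,
          C + (PySem.Int.mod (pc - C) 12 - 12)].filter (fun n => low ≤ n && n ≤ high)) = []
     then max low (min high C)
     else (PySem.List.min? ([C + PySem.Int.mod (pc - C) 12,
            C + (PySem.Int.mod (pc - C) 12 - 12)].filter (fun n => low ≤ n && n ≤ high))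
            (fun n => |n - note|)).getD 0)
    = (if (low ≤ C + PySem.Int.mod (pc - C) 12 ∧ C + PySem.Int.mod (pc - C) 12 ≤ high) ∧
          (low ≤ C + PySem.Int.mod (pc - C) 12 - 12 ∧ C + PySem.Int.mod (pc - C) 12 - 12 ≤ high) then
        if |C + PySem.Int.mod (pc - C) 12 - note| ≤ |C + PySem.Int.mod (pc - C) 12 - 12 - note| then
          C + PySem.Int.mod (pc - C) 12
        else C + PySem.Int.mod (pc - C) 12 - 12
      else if low ≤ C + PySem.Int.mod (pc - C) 12 ∧ C + PySem.Int.mod (pc - C) 12 ≤ high then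
        C + PySem.Int.mod (pc - C) 12
      else if low ≤ C + PySem.Int.mod (pc - C) 12 - 12 ∧ C + PySem.Int.mod (pc - C) 12 - 12 ≤ high then
        C + PySem.Int.mod (pc - C) 12 - 12
      else max low (min high C)) := by
  have h0 : 0 ≤ PySem.Int.mod (pc - C) 12 := PySem.Int.mod_nonneg _ (by norm_num)
  have h1 : PySem.Int.mod (pc - C) 12 < 12 := PySem.Int.mod_lt _ (by norm_num)
  generalize PySem.Int.mod (pc - C) 12 = m at h0 h1 ⊢
  have habs : C + (m - 12) - note = C + m - 12 - note := by ring
  by_cases h1u : low ≤ C + m <;> by_cases h2u : C + m ≤ high <;>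
    by_cases h1d : low ≤ C + (m - 12) <;> by_cases h2d : C + (m - 12) ≤ high <;>
    simp [List.filter, h1u, h2u, h1d, h2d, PySem.List.min?, habs, Option.getD_some] <;>
    (intros; first | rfl | omega | (split_ifs <;> simp only [Option.getD_some] <;> omega))

-- ===== VERDICT (by name: the statement is the Claim_ definition above) =====
theorem fit_note_to_range_spec : Claim_equal_fit_note_to_range := by
  intro note low high pc _
  unfold Spec_fit_note_to_range fit_note_to_range fit_note_to_range_alt
  simp only [pvLiftA_closed, pvDropA_closed]
  exact select_eq note low high pc _
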